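-- pv_equiv track=rewrite | github.com/maydenhiller/Terrain-Aware-AGM-Distance-Checker | app.py | _resolve_line_color
-- ===== SOURCE A (Python) =====
-- def _resolve_line_color(style_url, style_colors, stylemap_normal):
--     """Resolve styleUrl to LineStyle color string (aabbggrr). Returns None if not found."""
--     if not style_url or not style_url.strip():
--         return None
--     url = style_url.strip()
--     if "#" in url:
--         style_id = url.split("#")[-1].strip()
--     else:
--         style_id = url.split("/")[-1].strip() if "/" in url else url
--     if not style_id:
--         return None
--     if style_id in style_colors:
--         return style_colors[style_id]
--     if style_id in stylemap_normal:
--         return _resolve_line_color(stylemap_normal[style_id], style_colors, stylemap_normal)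
--     return None
-- ===== SOURCE B (Python) =====
-- def _style_id(url):
--     url = url.strip()
--     if "#" in url:
--         return url.split("#")[-1].strip()
--     if "/" in url:
--         return url.split("/")[-1].strip()
--     return url
--
--
-- def _resolve_line_color(style_url, style_colors, stylemap_normal):
--     """Two-stage resolution: materialise the (bounded) stylemap reference chain
--     of parsed style ids, then return the color of the first id found in
--     style_colors.  The bound len(stylemap_normal)+1 loses nothing on acyclic
--     chains and makes cyclic chains terminate with None."""
--     if not style_url or not style_url.strip():
--         return None
--     chain = []
--     sid = _style_id(style_url)
--     for _ in range(len(stylemap_normal) + 1):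
--         chain.append(sid)
--         if not sid or sid not in stylemap_normal:
--             break
--         nxt = stylemap_normal[sid]
--         if not nxt.strip():
--             break
--         sid = _style_id(nxt)
--     for sid in chain:
--         if sid and sid in style_colors:
--             return style_colors[sid]
--     return None
-- ===== Notes on version B (the rewrite author's own statement) =====
-- stated objective: alternative
-- what changed: Replaced the tail recursion with two staged passes: first build the bounded list of parsed style ids along the stylemap chain, then scan that list for the first id present in style_colors; cyclic chains terminate with None instead of overflowing the stack.
-- crash fix: On inputs whose stylemap reference chain from the parsed style id cycles, A raises RecursionError; B's bounded chain construction terminates and it returns None. — e.g. on _resolve_line_color(some "#a", [], [("a", "#a")]): A raises RecursionError, B returns none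
import Mathlib
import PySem

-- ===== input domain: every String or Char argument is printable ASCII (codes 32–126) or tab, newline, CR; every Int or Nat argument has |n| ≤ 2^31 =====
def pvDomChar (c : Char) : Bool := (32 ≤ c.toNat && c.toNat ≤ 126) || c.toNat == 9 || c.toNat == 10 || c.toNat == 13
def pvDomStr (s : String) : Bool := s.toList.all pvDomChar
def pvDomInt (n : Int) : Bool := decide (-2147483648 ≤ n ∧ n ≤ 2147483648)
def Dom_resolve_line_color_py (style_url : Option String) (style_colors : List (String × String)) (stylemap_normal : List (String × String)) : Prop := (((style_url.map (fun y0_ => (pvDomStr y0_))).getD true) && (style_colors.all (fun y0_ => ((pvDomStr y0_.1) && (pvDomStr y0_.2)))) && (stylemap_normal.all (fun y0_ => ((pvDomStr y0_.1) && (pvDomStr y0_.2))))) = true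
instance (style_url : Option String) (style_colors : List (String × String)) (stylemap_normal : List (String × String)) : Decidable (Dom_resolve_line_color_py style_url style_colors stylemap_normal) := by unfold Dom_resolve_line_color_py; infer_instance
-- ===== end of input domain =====

-- B restructures A's tail recursion into two staged passes: build the bounded chain of
-- parsed style ids, then scan it for the first style_colors hit (objective: alternative);
-- on cyclic chains A raises RecursionError, B returns None.


-- Shared helper: the styleUrl → style_id parse both Pythons perform verbatim
-- (url.strip(); split on '#' or '/', take the last piece, strip it).
def pvParseId (s : String) : String :=
  let url := PySem.Str.strip s
  if PySem.Str.isIn "#" url then PySem.Str.strip (((PySem.Str.split? url "#").getD []).getLastD "")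
  else if PySem.Str.isIn "/" url then PySem.Str.strip (((PySem.Str.split? url "/").getD []).getLastD "")
  else url

-- ===== PORT A =====
-- A recurses on the stylemap value; the fuel argument only makes the recursion total:
-- stylemap_normal.length + 2 is proved sufficient on every input admitted by Pre_.
def goA (sc sm : List (String × String)) : Nat → Option String → Option String
  | 0, _ => none
  | _ + 1, none => none
  | f + 1, some s =>
    if PySem.Str.strip s = "" then none
    else
      let id := pvParseId s
      if id = "" then none
      else match List.lookup id sc with
        | some c => some c
        | none =>
          match List.lookup id sm with
          | none => none
          | some v => goA sc sm f (some v)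

def resolve_line_color_py (style_url : Option String) (style_colors : List (String × String)) (stylemap_normal : List (String × String)) : Option String :=
  goA style_colors stylemap_normal (stylemap_normal.length + 2) style_url

-- ===== PORT B =====
-- Stage 1 of B: the bounded for-loop that materialises the chain of parsed style ids
-- (append the current id; stop on empty id, missing stylemap key, or blank stylemap value).
def pvBuildChain (sm : List (String × String)) : Nat → String → List String
  | 0, _ => []
  | k + 1, sid =>
    sid ::
      (if sid = "" then []
       else match List.lookup sid sm with
         | none => []
         | some nxt =>
           if PySem.Str.strip nxt = "" then []
           else pvBuildChain sm k (pvParseId nxt))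

-- Stage 2 of B: the for-loop over the chain returning the first non-empty id's color.
def pvScanChain (sc : List (String × String)) : List String → Option String
  | [] => none
  | sid :: rest =>
    if sid = "" then pvScanChain sc rest
    else match List.lookup sid sc with
      | some c => some c
      | none => pvScanChain sc rest

def resolve_line_color_py_alt (style_url : Option String) (style_colors : List (String × String)) (stylemap_normal : List (String × String)) : Option String :=
  match style_url with
  | none => none
  | some s =>
    if PySem.Str.strip s = "" then none
    else pvScanChain style_colors (pvBuildChain stylemap_normal (stylemap_normal.length + 1) (pvParseId s))

-- ===== PRECONDITION & SPEC =====
-- One step of the stylemap reference chain: from a style id to the next parsed id,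
-- defined exactly when A's recursion takes another step (a pure graph of the inputs).
def pvStep (sc sm : List (String × String)) (id : String) : Option String :=
  if id = "" then none
  else if (List.lookup id sc).isSome then none
  else match List.lookup id sm with
    | none => none
    | some v => if PySem.Str.strip v = "" then none else some (pvParseId v)

def pvIter (sc sm : List (String × String)) : Nat → String → Option String
  | 0, id => some id
  | n + 1, id =>
    match pvStep sc sm id with
    | none => none
    | some b => pvIter sc sm n b

-- Pre_ excludes exactly the inputs whose stylemap reference chain from the parsed style id
-- never terminates (a cyclic styleUrl chain): there Python A raises RecursionError.  A chain
-- that terminates does so within stylemap_normal.length + 1 steps, so the bound loses nothing.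
def Pre_resolve_line_color_py (style_url : Option String) (style_colors : List (String × String)) (stylemap_normal : List (String × String)) : Prop :=
  PySem.Str.strip (style_url.getD "") = "" ∨
    pvIter style_colors stylemap_normal (stylemap_normal.length + 1) (pvParseId (style_url.getD "")) = none
instance (style_url : Option String) (style_colors : List (String × String)) (stylemap_normal : List (String × String)) : Decidable (Pre_resolve_line_color_py style_url style_colors stylemap_normal) := by unfold Pre_resolve_line_color_py; infer_instance

def pvWitness_resolve_line_color_py : Option String × (List (String × String)) × (List (String × String)) :=
  (some "#red", [("red", "ff0000ff")], [("blue", "#red")])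

-- On inputs whose stylemap reference chain from the parsed style id cycles, A raises
-- RecursionError; B's bounded chain construction terminates and it returns None.
def Raises_resolve_line_color_py (style_url : Option String) (style_colors : List (String × String)) (stylemap_normal : List (String × String)) : Prop :=
  ¬ PySem.Str.strip (style_url.getD "") = "" ∧
    pvIter style_colors stylemap_normal (stylemap_normal.length + 1) (pvParseId (style_url.getD "")) ≠ none
instance (style_url : Option String) (style_colors : List (String × String)) (stylemap_normal : List (String × String)) : Decidable (Raises_resolve_line_color_py style_url style_colors stylemap_normal) := by unfold Raises_resolve_line_color_py; infer_instance

def pvRaiseWitness_resolve_line_color_py : Option String × (List (String × String)) × (List (String × String)) :=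
  (some "#a", [], [("a", "#a")])
def pvRaiseWitnessOut_resolve_line_color_py : Option String := none

def Spec_resolve_line_color_py (style_url : Option String) (style_colors : List (String × String)) (stylemap_normal : List (String × String)) (out : Option String) : Prop := out = resolve_line_color_py_alt style_url style_colors stylemap_normal
instance (style_url : Option String) (style_colors : List (String × String)) (stylemap_normal : List (String × String)) (out : Option String) : Decidable (Spec_resolve_line_color_py style_url style_colors stylemap_normal out) := by unfold Spec_resolve_line_color_py; infer_instance

-- ===== CLAIM (what is proved, stated in full; the proofs are below) =====
def Claim_equal_resolve_line_color_py : Prop := ∀ (style_url : Option String) (style_colors : List (String × String)) (stylemap_normal : List (String × String)), Dom_resolve_line_color_py style_url style_colors stylemap_normal → Pre_resolve_line_color_py style_url style_colors stylemap_normal → Spec_resolve_line_color_py style_url style_colors stylemap_normal (resolve_line_color_py style_url style_colors stylemap_normal)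

def Claim_raises_resolve_line_color_py : Prop := (∀ (style_url : Option String) (style_colors : List (String × String)) (stylemap_normal : List (String × String)), Dom_resolve_line_color_py style_url style_colors stylemap_normal → Raises_resolve_line_color_py style_url style_colors stylemap_normal → ¬ Pre_resolve_line_color_py style_url style_colors stylemap_normal) ∧ (Dom_resolve_line_color_py (pvRaiseWitness_resolve_line_color_py.1) (pvRaiseWitness_resolve_line_color_py.2.1) (pvRaiseWitness_resolve_line_color_py.2.2) ∧ Raises_resolve_line_color_py (pvRaiseWitness_resolve_line_color_py.1) (pvRaiseWitness_resolve_line_color_py.2.1) (pvRaiseWitness_resolve_line_color_py.2.2) ∧ resolve_line_color_py_alt (pvRaiseWitness_resolve_line_color_py.1) (pvRaiseWitness_resolve_line_color_py.2.1) (pvRaiseWitness_resolve_line_color_py.2.2) = pvRaiseWitnessOut_resolve_line_color_py)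

-- ===== LEMMAS AND PROOFS =====

-- Main lemma: if the chain from pvParseId v halts within n steps, A's recursion with fuel
-- ≥ n+1 equals B's build-then-scan with chain fuel ≥ n.
lemma pv_main (sc sm : List (String × String)) :
    ∀ (n f k : Nat) (v : String),
      PySem.Str.strip v ≠ "" →
      pvIter sc sm n (pvParseId v) = none →
      n + 1 ≤ f → n ≤ k →
      goA sc sm f (some v) = pvScanChain sc (pvBuildChain sm k (pvParseId v)) := by
  intro n
  induction n with
  | zero => intro f k v hv hn _ _; simp [pvIter] at hn
  | succ n ih =>
    intro f k v hv hn hf hk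
    obtain ⟨f', rfl⟩ : ∃ f', f = f' + 1 := ⟨f - 1, by omega⟩
    obtain ⟨k', rfl⟩ : ∃ k', k = k' + 1 := ⟨k - 1, by omega⟩
    set id := pvParseId v with hid
    by_cases hide : id = ""
    · simp [goA, pvBuildChain, pvScanChain, hv, ← hid, hide]
    · have hA : goA sc sm (f' + 1) (some v) =
          (match List.lookup id sc with
           | some c => some c
           | none =>
             match List.lookup id sm with
             | none => none
             | some nxt => goA sc sm f' (some nxt)) := by
        simp only [goA, if_neg hv, ← hid, if_neg hide]
      have hB : pvBuildChain sm (k' + 1) id =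
          id :: (match List.lookup id sm with
                 | none => []
                 | some nxt =>
                   if PySem.Str.strip nxt = "" then []
                   else pvBuildChain sm k' (pvParseId nxt)) := by
        simp only [pvBuildChain, if_neg hide]
      rw [hA, hB]
      cases hlc : List.lookup id sc with
      | some c => simp [pvScanChain, hide, hlc]
      | none =>
        cases hlm : List.lookup id sm with
        | none => simp [pvScanChain, hide, hlc]
        | some nxt =>
          by_cases hnxt : PySem.Str.strip nxt = ""
          · obtain ⟨f'', rfl⟩ : ∃ f'', f' = f'' + 1 := ⟨f' - 1, by omega⟩
            simp [goA, hnxt, pvScanChain, hide, hlc]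
          · have hstep : pvStep sc sm id = some (pvParseId nxt) := by
              simp [pvStep, hide, hlc, hlm, hnxt]
            have hn' : pvIter sc sm n (pvParseId nxt) = none := by
              have := hn
              simp only [pvIter, hstep] at this
              exact this
            simp only [if_neg hnxt, pvScanChain, if_neg hide, hlc]
            exact ih f' k' nxt hnxt hn' (by omega) (by omega)

-- ===== VERDICT (by name: the statement is the Claim_ definition above) =====
theorem resolve_line_color_py_spec : Claim_equal_resolve_line_color_py := by
  intro su sc sm _ hpre
  unfold Spec_resolve_line_color_py resolve_line_color_py resolve_line_color_py_alt
  cases su with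
  | none => simp [goA]
  | some s =>
    by_cases hs : PySem.Str.strip s = ""
    · simp [goA, hs]
    · dsimp only
      rw [if_neg hs]
      rcases hpre with h | h
      · exact absurd h (by simpa using hs)
      · exact pv_main sc sm (sm.length + 1) (sm.length + 2) (sm.length + 1) s hs
          (by simpa using h) (by omega) (by omega)

@[simp] theorem resolve_line_color_py_raises : Claim_raises_resolve_line_color_py := by
  unfold Claim_raises_resolve_line_color_py
  refine ⟨?_, by decide⟩
  intro su sc sm _ hr hpre
  rcases hpre with h | h
  · exact hr.1 h
  · exact hr.2 h
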